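-- pv_equiv track=rewrite | github.com/AliCW/random-katas | python-venv/part-list/partList.py | part_list
-- ===== SOURCE A (Python) =====
-- def part_list(arr):
--
--     output = []
--     sliceIndex = 0
--
--     for i in range(len(arr) - 1):
--         sliceIndex += 1
--         input = []
--         add = arr[0:sliceIndex]
--         appendFront = ' '.join(add)
--
--         extra = arr[sliceIndex:len(arr)]
--         appendBack = ' '.join(extra)
--         input.append(appendFront)
--         input.append(appendBack)
--
--         output.append(input)
--
--     return output
-- ===== SOURCE B (Python) =====
-- def part_list(arr):
--     n = len(arr)
--     if n < 2:
--         return []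
--     # suffix table: suf[i] = ' '.join(arr[i:]), built in one backward pass
--     suf = [''] * n
--     suf[n - 1] = arr[n - 1]
--     for i in range(n - 2, 0, -1):
--         suf[i] = arr[i] + ' ' + suf[i + 1]
--     # forward pass: grow the prefix string incrementally and pair it with suf
--     out = []
--     pref = arr[0]
--     for i in range(1, n):
--         out.append([pref, suf[i]])
--         if i < n - 1:
--             pref = pref + ' ' + arr[i]
--     return out
-- ===== Notes on version B (the rewrite author's own statement) =====
-- stated objective: alternative
-- what changed: Replaces A's per-split re-slicing and from-scratch ' '.join of both halves with a single backward pass building an incremental suffix table plus a forward pass that grows the prefix string and pairs it with the table.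
import Mathlib
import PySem

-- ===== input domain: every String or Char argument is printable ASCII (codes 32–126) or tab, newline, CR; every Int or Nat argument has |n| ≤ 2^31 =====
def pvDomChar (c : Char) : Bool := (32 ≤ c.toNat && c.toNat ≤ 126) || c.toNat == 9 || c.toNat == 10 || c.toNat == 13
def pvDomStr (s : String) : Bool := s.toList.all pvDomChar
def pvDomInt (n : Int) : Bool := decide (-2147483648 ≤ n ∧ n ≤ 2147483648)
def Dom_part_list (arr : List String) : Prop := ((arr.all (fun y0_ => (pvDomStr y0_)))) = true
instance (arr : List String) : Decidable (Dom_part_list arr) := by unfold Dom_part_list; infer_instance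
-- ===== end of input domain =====

-- B replaces A's per-split re-slicing and re-joining with an incremental suffix table
-- plus a prefix-growing forward pass (alternative decomposition, same asymptotic cost).

-- ===== PORT A =====
-- literal transliteration of A's loop: state = (sliceIndex, output)
def part_list (arr : List String) : List (List String) :=
  ((PySem.List.pyRange 0 ((arr.length : Int) - 1) 1).foldl
    (fun (st : Int × List (List String)) _i =>
      let sliceIndex := st.1 + 1
      let add := PySem.List.slice arr (some 0) (some sliceIndex)
      let appendFront := PySem.Str.join " " add
      let extra := PySem.List.slice arr (some sliceIndex) (some (arr.length : Int))
      let appendBack := PySem.Str.join " " extra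
      (sliceIndex, st.2 ++ [[appendFront, appendBack]]))
    (0, [])).2

-- ===== PORT B =====
-- backward pass of Source B: sufTable [a_i, …, a_{n-1}] = [suf_i, …, suf_{n-1}], suf_i = a_i + ' ' + suf_{i+1}
def sufTable : List String → List String
  | [] => []
  | [x] => [x]
  | x :: y :: rest =>
    match sufTable (y :: rest) with
    | [] => [x]            -- unreachable: sufTable of a nonempty list is nonempty
    | h :: t => (x ++ " " ++ h) :: h :: t

-- forward pass of Source B: grow pref with the next word, pair it with the suffix table
def prefPass (pref : String) : List String → List String → List (List String)
  | y :: rest, s :: sufs => [pref, s] :: prefPass (pref ++ " " ++ y) rest sufs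
  | _, _ => []

def part_list_alt (arr : List String) : List (List String) :=
  match arr with
  | [] => []
  | x :: rest => prefPass x rest (sufTable rest)

-- ===== PRECONDITION & SPEC =====
def Spec_part_list (arr : List String) (out : List (List String)) : Prop := out = part_list_alt arr
instance (arr : List String) (out : List (List String)) : Decidable (Spec_part_list arr out) := by unfold Spec_part_list; infer_instance

-- ===== CLAIM (what is proved, stated in full; the proofs are below) =====
def Claim_equal_part_list : Prop := ∀ (arr : List String), Dom_part_list arr → Spec_part_list arr (part_list arr)

-- ===== LEMMAS AND PROOFS =====

-- ' '.join absorbs the first separator: join " " (x :: y :: l) = join " " ((x + " " + y) :: l)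
theorem join_glue (x y : String) (l : List String) :
    PySem.Str.join " " (x :: y :: l) = PySem.Str.join " " ((x ++ " " ++ y) :: l) := by
  cases l with
  | nil =>
    apply String.toList_injective
    simp [PySem.Str.join, PySem.Chars.join_cons_cons, PySem.Chars.join_singleton]
  | cons z t =>
    apply String.toList_injective
    simp [PySem.Str.join, PySem.Chars.join_cons_cons]

theorem join_one (x : String) : PySem.Str.join " " [x] = x := by
  simp [PySem.Str.join]

theorem join_cons_cons_str (x y : String) (l : List String) :
    PySem.Str.join " " (x :: y :: l) = x ++ " " ++ PySem.Str.join " " (y :: l) := by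
  apply String.toList_injective
  simp [PySem.Str.join, PySem.Chars.join_cons_cons]

theorem sufTable_eq (l : List String) :
    sufTable l = match l with
      | [] => []
      | y :: rest => PySem.Str.join " " (y :: rest) :: sufTable rest := by
  induction l with
  | nil => rfl
  | cons x t ih =>
    cases t with
    | nil => simp [sufTable, join_one]
    | cons y rest =>
      simp only [sufTable, ih, join_cons_cons_str]

-- the common characterization of one output row at split point k+1
theorem main_eq (rest : List String) (x : String) :
    (List.range rest.length).map (fun k =>
        [PySem.Str.join " " ((x :: rest).take (k+1)),
         PySem.Str.join " " ((x :: rest).drop (k+1))])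
      = prefPass x rest (sufTable rest) := by
  induction rest generalizing x with
  | nil => rfl
  | cons y r ih =>
    rw [sufTable_eq]
    simp only [List.length_cons, List.range_succ_eq_map, List.map_cons, List.map_map]
    rw [prefPass]
    congr 1
    · simp [join_one]
    · rw [← ih (x ++ " " ++ y)]
      apply List.map_congr_left
      intro k _
      simp only [Function.comp, List.take, List.drop, join_glue]

-- one output row of A, at split index j (as a Nat)
def rowA (arr : List String) (j : Nat) : List String :=
  [PySem.Str.join " " (arr.take j), PySem.Str.join " " (arr.drop j)]

-- the two slices of A's loop body are take/drop
theorem slice_front (arr : List String) (j : Nat) :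
    PySem.List.slice arr (some 0) (some (j : Int)) = arr.take j := by
  rw [PySem.List.slice_zero_start, PySem.List.slice_to_natCast]

theorem slice_back (arr : List String) (j : Nat) :
    PySem.List.slice arr (some (j : Int)) (some (arr.length : Int)) = arr.drop j := by
  rw [PySem.List.slice_natCast]
  exact List.take_of_length_le (by simp)

-- A's foldl ignores the loop variable; its state after m steps from counter c
theorem foldA (arr : List String) (l : List Int) (c : Nat) (acc : List (List String)) :
    (l.foldl
      (fun (st : Int × List (List String)) _i =>
        let sliceIndex := st.1 + 1
        let add := PySem.List.slice arr (some 0) (some sliceIndex)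
        let appendFront := PySem.Str.join " " add
        let extra := PySem.List.slice arr (some sliceIndex) (some (arr.length : Int))
        let appendBack := PySem.Str.join " " extra
        (sliceIndex, st.2 ++ [[appendFront, appendBack]]))
      ((c : Int), acc)).2
      = acc ++ (List.range l.length).map (fun k => rowA arr (c + k + 1)) := by
  induction l generalizing c acc with
  | nil => simp
  | cons i l ih =>
    rw [List.foldl_cons]
    have hc : ((c : Int) + 1) = ((c + 1 : Nat) : Int) := by push_cast; ring
    simp only [hc, slice_front, slice_back]
    rw [ih (c + 1)]
    rw [List.length_cons, List.range_succ_eq_map, List.map_cons, List.map_map,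
      List.append_assoc, List.singleton_append]
    congr 1
    congr 1
    all_goals try norm_num
    all_goals (intro k _; congr 1; omega)

theorem part_list_eq_map (arr : List String) :
    part_list arr = match arr with
      | [] => []
      | x :: rest => (List.range rest.length).map (fun k =>
          [PySem.Str.join " " ((x :: rest).take (k+1)),
           PySem.Str.join " " ((x :: rest).drop (k+1))]) := by
  unfold part_list
  have h := foldA arr (PySem.List.pyRange 0 ((arr.length : Int) - 1) 1) 0 []
  simp only [Nat.cast_zero] at h
  rw [h]
  cases arr with
  | nil => simp [PySem.List.pyRange_one_eq_nil]
  | cons x rest =>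
    rw [List.nil_append, PySem.List.length_pyRange_one]
    have hlen : ((((x :: rest).length : Int)) - 1 - 0).toNat = rest.length := by
      simp
    rw [show ((((x :: rest).length : Int)) - 1) = ((((x :: rest).length : Int)) - 1 - 0) by ring] at hlen ⊢
    rw [hlen]
    apply List.map_congr_left
    intro k _
    simp [rowA]

-- ===== VERDICT (by name: the statement is the Claim_ definition above) =====
theorem part_list_spec : Claim_equal_part_list := by
  intro arr _
  unfold Spec_part_list part_list_alt
  rw [part_list_eq_map]
  cases arr with
  | nil => rfl
  | cons x rest => exact main_eq rest x
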